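-- pv_equiv track=rewrite | github.com/hannah-scott/advent-of-code-2021 | day-14.py | get_lc_from_pc
-- ===== SOURCE A (Python) =====
-- def get_lc_from_pc(pc):
--     lc = {}
--     for pair in pc:
--         for letter in pair:
--             lc[letter] = 0
--
--     for pair in pc:
--         for letter in pair:
--             lc[letter] += pc[pair]
--
--     return lc
-- ===== SOURCE B (Python) =====
-- def get_lc_from_pc(pc):
--     # loop inversion: collect the distinct letters in first-touch order, then
--     # compute each letter's total directly with a generator sum (no mutable
--     # accumulator dict, no in-place updates)
--     letters = dict.fromkeys(letter for pair in pc for letter in pair)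
--     return {target: sum(v for pair, v in pc.items()
--                         for letter in pair if letter == target)
--             for target in letters}
-- ===== Notes on version B (the rewrite author's own statement) =====
-- stated objective: alternative
-- what changed: A mutates an accumulator dict in two passes over the pairs; B inverts the loops: it first collects the distinct letters in first-touch order, then computes each letter's total independently with a direct generator sum over the pairs, with no mutable accumulator.
import Mathlib
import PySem

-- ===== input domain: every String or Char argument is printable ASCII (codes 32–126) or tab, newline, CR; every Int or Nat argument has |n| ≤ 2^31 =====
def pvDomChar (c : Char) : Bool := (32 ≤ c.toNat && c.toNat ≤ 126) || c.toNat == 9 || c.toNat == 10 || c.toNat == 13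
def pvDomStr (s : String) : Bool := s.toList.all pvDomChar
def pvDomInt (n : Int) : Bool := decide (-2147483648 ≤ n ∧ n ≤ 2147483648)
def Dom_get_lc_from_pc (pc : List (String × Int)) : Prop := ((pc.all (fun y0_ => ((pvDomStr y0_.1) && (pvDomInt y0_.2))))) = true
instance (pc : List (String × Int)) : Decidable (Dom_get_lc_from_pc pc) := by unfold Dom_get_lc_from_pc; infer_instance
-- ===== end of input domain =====

-- B inverts A's loops: distinct letters first, then one direct sum per letter (objective: alternative).

-- ===== PORT A =====
-- Two passes over pc: first insert 0 for every letter, then 'lc[letter] += pc[pair]'.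
-- 'lc[letter] +=' is ported with getD/insert: after the first pass every letter key is
-- present, and pc[pair] is a lookup on a key that is itself in pc, so the getD defaults
-- are never consulted and no KeyError path exists (A is total).
def get_lc_from_pc (pc : List (String × Int)) : List (String × Int) :=
  let d : PySem.Dict String Int := PySem.Dict.mk pc
  let lc0 : PySem.Dict String Int :=
    pc.foldl (fun lc p => p.1.toList.foldl
      (fun lc c => lc.insert (String.ofList [c]) 0) lc) PySem.Dict.empty
  let lc : PySem.Dict String Int :=
    pc.foldl (fun lc p => p.1.toList.foldl
      (fun lc c => lc.insert (String.ofList [c]) (lc.getD (String.ofList [c]) 0 + d.getD p.1 0)) lc) lc0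
  lc.items

-- ===== PORT B =====
-- letters = dict.fromkeys(letter for pair in pc for letter in pair)  → Set.ofList in first-touch order;
-- then {target: sum(v for pair, v in pc.items() for letter in pair if letter == target) for target in letters}.
def get_lc_from_pc_alt (pc : List (String × Int)) : List (String × Int) :=
  let letters := PySem.Set.ofList (pc.flatMap (fun p => p.1.toList.map (fun c => String.ofList [c])))
  letters.map (fun target => (target,
    (pc.flatMap (fun p => p.1.toList.filterMap (fun c =>
        if String.ofList [c] == target then some p.2 else none))).sum))

-- ===== PRECONDITION & SPEC =====
-- Pre_ excludes association lists with duplicate keys: they represent no Python dict (A's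
-- argument is a dict, whose keys are unique), so any value either port gives there is accidental.
def Pre_get_lc_from_pc (pc : List (String × Int)) : Prop := (pc.map Prod.fst).Nodup
instance (pc : List (String × Int)) : Decidable (Pre_get_lc_from_pc pc) := by unfold Pre_get_lc_from_pc; infer_instance

def pvWitness_get_lc_from_pc : (List (String × Int)) := [("AB", 2), ("BC", 3)]

def Spec_get_lc_from_pc (pc : List (String × Int)) (out : List (String × Int)) : Prop := out = get_lc_from_pc_alt pc
instance (pc : List (String × Int)) (out : List (String × Int)) : Decidable (Spec_get_lc_from_pc pc out) := by unfold Spec_get_lc_from_pc; infer_instance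

-- ===== CLAIM (what is proved, stated in full; the proofs are below) =====
def Claim_equal_get_lc_from_pc : Prop := ∀ (pc : List (String × Int)), Dom_get_lc_from_pc pc → Pre_get_lc_from_pc pc → Spec_get_lc_from_pc pc (get_lc_from_pc pc)

-- ===== LEMMAS AND PROOFS =====

-- the flat list of (letter, pc[pair]) updates A performs, in order
def pvLV (pc : List (String × Int)) : List (String × Int) :=
  pc.flatMap (fun p => p.1.toList.map (fun c => (String.ofList [c], (PySem.Dict.mk pc).getD p.1 0)))

-- the flat list of letters, in order (= (pvLV pc).map Prod.fst)
def pvK (pc : List (String × Int)) : List String :=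
  pc.flatMap (fun p => p.1.toList.map (fun c => String.ofList [c]))

-- the accumulation step of A's second pass
def pvStep (d : PySem.Dict String Int) (q : String × Int) : PySem.Dict String Int :=
  d.insert q.1 (d.getD q.1 0 + q.2)

-- per-key total of the updates in l
def pvS (l : List (String × Int)) (k : String) : Int :=
  ((l.filter (fun p => p.1 == k)).map Prod.snd).sum

theorem pvS_cons (q : String × Int) (l : List (String × Int)) (k : String) :
    pvS (q :: l) k = (if q.1 = k then q.2 else 0) + pvS l k := by
  simp only [pvS, List.filter_cons]
  by_cases h : q.1 = k
  · simp [h]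
  · simp [h]

theorem pv_map_fst_pvLV (pc : List (String × Int)) : (pvLV pc).map Prod.fst = pvK pc := by
  simp only [pvLV, pvK, List.map_flatMap, List.map_map]
  rfl

theorem pv_second_eq_flat (pc : List (String × Int)) (d0 : PySem.Dict String Int) :
    pc.foldl (fun lc p => p.1.toList.foldl
      (fun lc c => lc.insert (String.ofList [c]) (lc.getD (String.ofList [c]) 0 + (PySem.Dict.mk pc).getD p.1 0)) lc) d0
    = (pvLV pc).foldl pvStep d0 := by
  rw [pvLV, List.foldl_flatMap]
  congr 1; funext lc p
  rw [List.foldl_map]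
  rfl

theorem pv_zero_eq_flat (pc : List (String × Int)) (d0 : PySem.Dict String Int) :
    pc.foldl (fun lc p => p.1.toList.foldl
      (fun lc c => lc.insert (String.ofList [c]) 0) lc) d0
    = (pvK pc).foldl (fun d k => d.insert k 0) d0 := by
  rw [pvK, List.foldl_flatMap]
  congr 1; funext lc p
  rw [List.foldl_map]

theorem pv_filter_of_false (s : List String) (k : String) (f : String → Bool) (h : f k = false) :
    (PySem.Set.discard s k).filter f = s.filter f := by
  simp only [PySem.Set.discard, List.filter_filter]
  apply List.filter_congr
  intro j _
  by_cases hj : j = k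
  · subst hj; simp [h]
  · simp [hj]

theorem pv_filter_not_contains_insert (s : List String) (k : String) (v : Int)
    (d : PySem.Dict String Int) :
    s.filter (fun j => !((d.insert k v).contains j))
      = (PySem.Set.discard s k).filter (fun j => !(d.contains j)) := by
  simp only [PySem.Set.discard, List.filter_filter]
  apply List.filter_congr
  intro j _
  rw [PySem.Dict.contains_insert]
  by_cases hj : j = k <;> simp [hj, Bool.and_comm]

-- A's first pass: inserting 0 for a list of keys appends the fresh keys, zero-valued, in first-touch order
theorem pv_zero_pass (ks : List String) (d : PySem.Dict String Int)
    (hnd : d.keys.Nodup) (h0 : ∀ p ∈ d.items, p.2 = 0) :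
    (ks.foldl (fun d k => d.insert k 0) d).items
      = d.items ++ ((PySem.Set.ofList ks).filter (fun k => !(d.contains k))).map (fun k => (k, (0 : Int))) := by
  induction ks generalizing d with
  | nil => simp [PySem.Set.ofList]
  | cons k ks ih =>
    simp only [List.foldl_cons]
    have hnd' : (d.insert k 0).keys.Nodup := PySem.Dict.nodup_keys_insert _ _ _ hnd
    by_cases hc : d.contains k = true
    · have hitems : (d.insert k 0).items = d.items := by
        rw [PySem.Dict.items_insert_of_contains (h := hc)]
        apply (List.map_congr_left ?_).trans (List.map_id _)
        intro p hp
        by_cases hpk : p.1 = k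
        · simp [hpk, Prod.ext_iff, (h0 p hp).symm]
        · simp [hpk]
      rw [ih _ hnd' (by rw [hitems]; exact h0), hitems]
      congr 1
      rw [PySem.Set.ofList_cons, List.filter_cons_of_neg (by simp [hc]),
          pv_filter_of_false _ _ _ (by simp [hc])]
      congr 1
      apply List.filter_congr
      intro j _
      rw [PySem.Dict.contains_insert]
      by_cases hj : j = k <;> simp [hj, hc]
    · have hc' : d.contains k = false := by simpa using hc
      have hitems : (d.insert k 0).items = d.items ++ [(k, (0 : Int))] :=
        PySem.Dict.items_insert_of_not_contains d 0 hc'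
      rw [ih _ hnd' (by rw [hitems]; intro p hp; rcases List.mem_append.1 hp with h | h
                        · exact h0 p h
                        · simp at h; simp [h]), hitems]
      rw [PySem.Set.ofList_cons, List.filter_cons_of_pos (by simp [hc']), List.map_cons,
          pv_filter_not_contains_insert]
      simp

-- A's accumulation pass: existing entries get their per-key total added (in place),
-- fresh keys are appended in first-touch order carrying their per-key total
theorem pv_acc_pass (l : List (String × Int)) (d : PySem.Dict String Int)
    (hnd : d.keys.Nodup) :
    (l.foldl pvStep d).items
      = d.items.map (fun p => (p.1, p.2 + pvS l p.1))
        ++ ((PySem.Set.ofList (l.map Prod.fst)).filter (fun k => !(d.contains k))).map (fun k => (k, pvS l k)) := by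
  induction l generalizing d with
  | nil => simp [pvS, PySem.Set.ofList]
  | cons q l ih =>
    obtain ⟨k, v⟩ := q
    simp only [List.foldl_cons, List.map_cons]
    have hnd' : (pvStep d (k, v)).keys.Nodup := PySem.Dict.nodup_keys_insert _ _ _ hnd
    rw [ih _ hnd']
    by_cases hc : d.contains k = true
    · have hitems : (pvStep d (k, v)).items
          = d.items.map (fun p => if p.1 == k then (k, d.getD k 0 + v) else p) :=
        PySem.Dict.items_insert_of_contains d _ hc
      rw [hitems, List.map_map]
      congr 1
      · apply List.map_congr_left
        intro p hp
        by_cases hpk : p.1 = k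
        · have hg : d.getD k 0 = p.2 := by
            have : (k, p.2) ∈ d.items := by
              have : p = (k, p.2) := by rw [← hpk]
              rw [← this]; exact hp
            exact PySem.Dict.getD_of_mem_items d this hnd 0
          simp [Function.comp, hpk, hg, pvS_cons, Prod.ext_iff]
          ring
        · have hkp : k ≠ p.1 := fun h => hpk h.symm
          simp [Function.comp, hpk, hkp, pvS_cons]
      · rw [show (fun j => !((pvStep d (k, v)).contains j)) = (fun j => !((d.insert k (d.getD k 0 + v)).contains j)) from rfl,
            pv_filter_not_contains_insert,
            PySem.Set.ofList_cons, List.filter_cons_of_neg (by simp [hc])]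
        apply List.map_congr_left
        intro j hj
        have hjk : k ≠ j := fun h => (((PySem.Set.mem_discard _ _ _).1 (List.mem_filter.1 hj).1).2) h.symm
        simp [pvS_cons, hjk]
    · have hc' : d.contains k = false := by simpa using hc
      have hkn : k ∉ d.keys := by
        rw [PySem.Dict.contains_eq_decide_mem_keys] at hc'
        simpa using hc'
      have hitems : (pvStep d (k, v)).items = d.items ++ [(k, d.getD k 0 + v)] :=
        PySem.Dict.items_insert_of_not_contains d _ hc'
      rw [hitems, PySem.Dict.getD_of_not_contains d 0 hc']
      rw [show (fun j => !((pvStep d (k, v)).contains j)) = (fun j => !((d.insert k (d.getD k 0 + v)).contains j)) from rfl,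
          pv_filter_not_contains_insert,
          PySem.Set.ofList_cons, List.filter_cons_of_pos (by simp [hc']), List.map_cons, List.map_append]
      rw [List.append_assoc]
      have h1 : List.map (fun p => (p.1, p.2 + pvS l p.1)) d.items
          = List.map (fun p => (p.1, p.2 + pvS ((k, v) :: l) p.1)) d.items := by
        apply List.map_congr_left
        intro p hp
        have hpk : p.1 ≠ k := fun h => hkn (h ▸ PySem.Dict.mem_keys_of_mem_items d hp)
        have hkp : k ≠ p.1 := fun h => hpk h.symm
        simp [pvS_cons, hkp]
      have h3 : List.map (fun j => (j, pvS l j))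
            (((PySem.Set.ofList (List.map Prod.fst l)).discard k).filter (fun j => !d.contains j))
          = List.map (fun j => (j, pvS ((k, v) :: l) j))
            (((PySem.Set.ofList (List.map Prod.fst l)).discard k).filter (fun j => !d.contains j)) := by
        apply List.map_congr_left
        intro j hj
        have hjk : k ≠ j := fun h => (((PySem.Set.mem_discard _ _ _).1 (List.mem_filter.1 hj).1).2) h.symm
        simp [pvS_cons, hjk]
      have h2 : (0 : Int) + v + pvS l k = pvS ((k, v) :: l) k := by simp [pvS_cons]
      rw [h1, h3]
      simp [← h2]

-- A's result, characterised: the distinct letters in first-touch order, each with its per-key total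
theorem pvA_eq (pc : List (String × Int)) :
    get_lc_from_pc pc = (PySem.Set.ofList (pvK pc)).map (fun k => (k, pvS (pvLV pc) k)) := by
  simp only [get_lc_from_pc]
  rw [pv_zero_eq_flat pc, pv_second_eq_flat pc]
  have hZitems : ((pvK pc).foldl (fun d k => d.insert k 0) PySem.Dict.empty).items
      = (PySem.Set.ofList (pvK pc)).map (fun k => (k, (0 : Int))) := by
    rw [pv_zero_pass _ _ PySem.Dict.nodup_keys_empty (by intro p hp; simp only [show (PySem.Dict.empty : PySem.Dict String Int).items = [] from rfl] at hp; cases hp)]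
    simp [PySem.Dict.contains_empty]
    rfl
  have hZkeys : ((pvK pc).foldl (fun d k => d.insert k 0) (PySem.Dict.empty : PySem.Dict String Int)).keys
      = PySem.Set.ofList (pvK pc) := by
    show (((pvK pc).foldl (fun d k => d.insert k 0) (PySem.Dict.empty : PySem.Dict String Int)).items).map Prod.fst
      = PySem.Set.ofList (pvK pc)
    rw [hZitems, List.map_map]
    exact List.map_id _
  rw [pv_acc_pass _ _ (by rw [hZkeys]; exact PySem.Set.nodup_ofList _)]
  rw [hZitems, pv_map_fst_pvLV]
  have hfZ : (PySem.Set.ofList (pvK pc)).filter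
      (fun k => !(((pvK pc).foldl (fun d k => d.insert k 0) (PySem.Dict.empty : PySem.Dict String Int)).contains k)) = [] := by
    rw [List.filter_eq_nil_iff]
    intro j hj
    rw [PySem.Dict.contains_eq_decide_mem_keys, hZkeys]
    simp [hj]
  rw [hfZ, List.map_map]
  simp

-- first-match lookup in a duplicate-free association list returns the entry's own value
theorem pv_getD_mk (pc : List (String × Int)) (hnd : (pc.map Prod.fst).Nodup)
    (k : String) (v : Int) (hm : (k, v) ∈ pc) :
    (PySem.Dict.mk pc).getD k 0 = v := by
  induction pc with
  | nil => cases hm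
  | cons q rest ih =>
    obtain ⟨a, b⟩ := q
    rw [PySem.Dict.getD_eq_get?_getD, PySem.Dict.get?_mk_cons]
    rcases List.mem_cons.1 hm with h | h
    · simp only [Prod.mk.injEq] at h
      obtain ⟨rfl, rfl⟩ := h
      simp
    · have hak : a ≠ k := by
        intro rfl
        exact (List.nodup_cons.1 hnd).1 (List.mem_map.2 ⟨(a, v), h, rfl⟩)
      simp only [beq_iff_eq, hak, if_false]
      rw [← PySem.Dict.getD_eq_get?_getD]
      exact ih (List.nodup_cons.1 hnd).2 h

-- one pair's contribution: the per-key total of its letter updates equals B's filtered sum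
theorem pv_inner (cs : List Char) (v : Int) (k : String) :
    pvS (cs.map (fun c => (String.ofList [c], v))) k
      = (cs.filterMap (fun c => if String.ofList [c] == k then some v else none)).sum := by
  induction cs with
  | nil => simp [pvS]
  | cons c cs ih =>
    simp only [List.map_cons, pvS_cons, List.filterMap_cons]
    by_cases h : String.ofList [c] = k
    · simp [h, ih]
    · simp [h, ih]

theorem pvS_append (l1 l2 : List (String × Int)) (k : String) :
    pvS (l1 ++ l2) k = pvS l1 k + pvS l2 k := by
  simp [pvS, List.filter_append]

-- the whole per-key total equals B's generator sum, entry by entry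
theorem pv_sum_aux (g : (String × Int) → Int) (l : List (String × Int)) (k : String)
    (h : ∀ p ∈ l, g p = p.2) :
    pvS (l.flatMap (fun p => p.1.toList.map (fun c => (String.ofList [c], g p)))) k
      = (l.flatMap (fun p => p.1.toList.filterMap (fun c =>
          if String.ofList [c] == k then some p.2 else none))).sum := by
  induction l with
  | nil => simp [pvS]
  | cons p l ih =>
    simp only [List.flatMap_cons, pvS_append, List.sum_append]
    rw [pv_inner, h p (List.mem_cons_self), ih (fun q hq => h q (List.mem_cons_of_mem _ hq))]

-- ===== VERDICT (by name: the statement is the Claim_ definition above) =====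
theorem get_lc_from_pc_spec : Claim_equal_get_lc_from_pc := by
  intro pc _ hpre
  show get_lc_from_pc pc = get_lc_from_pc_alt pc
  rw [pvA_eq]
  show (PySem.Set.ofList (pvK pc)).map (fun k => (k, pvS (pvLV pc) k))
    = (PySem.Set.ofList (pvK pc)).map (fun target => (target,
        (pc.flatMap (fun p => p.1.toList.filterMap (fun c =>
          if String.ofList [c] == target then some p.2 else none))).sum))
  apply List.map_congr_left
  intro k _
  have hg : ∀ p ∈ pc, (PySem.Dict.mk pc).getD p.1 0 = p.2 := by
    intro p hp
    exact pv_getD_mk pc hpre p.1 p.2 (by simpa using hp)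
  have := pv_sum_aux (fun p => (PySem.Dict.mk pc).getD p.1 0) pc k hg
  simp only [Prod.mk.injEq, true_and]
  exact this
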